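-- pv_equiv track=rewrite | github.com/neoyogi/onepk | onepk_without_pyc/onep/policyservice/match.py | _convert_to_thrift_array
-- ===== SOURCE A (Python) =====
-- def _convert_to_thrift_array(mac_address):
--     mac_thrift_array = list()
--     item_pos = 0
--     for item in mac_address:
--         item_pos += 1
--         if item > 255 or item < 0:
--             return (item_pos, None)
--         if item > 127:
--             mac_thrift_array.append(item - 256)
--         else:
--             mac_thrift_array.append(item)
--
--     return (0, mac_thrift_array)
-- ===== SOURCE B (Python) =====
-- def _convert_to_thrift_array(mac_address):
--     pos = next((i + 1 for i, b in enumerate(mac_address) if b > 255 or b < 0), 0)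
--     if pos != 0:
--         return (pos, None)
--     return (0, [b - 256 if b > 127 else b for b in mac_address])
-- ===== Notes on version B (the rewrite author's own statement) =====
-- stated objective: alternative
-- what changed: Replaces A's fused validate-and-build loop with two shaped passes: first locate the 1-indexed position of the first out-of-range byte (default 0), then, only if all bytes are valid, build the signed array with a single comprehension.
import Mathlib
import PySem

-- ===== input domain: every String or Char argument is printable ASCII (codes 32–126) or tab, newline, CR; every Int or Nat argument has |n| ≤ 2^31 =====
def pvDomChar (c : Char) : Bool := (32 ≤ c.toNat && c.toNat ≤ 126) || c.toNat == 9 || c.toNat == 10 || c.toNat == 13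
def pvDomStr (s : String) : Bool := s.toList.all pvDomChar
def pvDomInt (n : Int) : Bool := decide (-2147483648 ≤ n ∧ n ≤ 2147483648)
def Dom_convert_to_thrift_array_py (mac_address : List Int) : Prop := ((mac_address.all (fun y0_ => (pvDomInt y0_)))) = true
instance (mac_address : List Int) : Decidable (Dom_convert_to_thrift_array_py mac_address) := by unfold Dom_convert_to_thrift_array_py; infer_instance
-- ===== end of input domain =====

-- B replaces A's fused validate-and-build loop with two passes: locate the first bad byte, then map; alternative decomposition, same cost.

-- ===== PORT A =====
-- A's single loop: item_pos counter, early return on out-of-range, append converted byte.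
def pvAloop : List Int → Int → List Int → Int × Option (List Int)
  | [], _, acc => (0, some acc)
  | item :: rest, item_pos, acc =>
    if item > 255 ∨ item < 0 then (item_pos + 1, none)
    else if item > 127 then pvAloop rest (item_pos + 1) (acc ++ [item - 256])
    else pvAloop rest (item_pos + 1) (acc ++ [item])

def convert_to_thrift_array_py (mac_address : List Int) : Int × Option (List Int) :=
  pvAloop mac_address 0 []

-- ===== PORT B =====
-- pass 1: 1-indexed position of the first out-of-range byte, 0 if none (next(... , 0) over enumerate)
def pvBfirstBad : List Int → Int → Int
  | [], _ => 0
  | b :: rest, i => if b > 255 ∨ b < 0 then i + 1 else pvBfirstBad rest (i + 1)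

def convert_to_thrift_array_py_alt (mac_address : List Int) : Int × Option (List Int) :=
  let pos := pvBfirstBad mac_address 0
  if pos ≠ 0 then (pos, none)
  else (0, some (mac_address.map (fun b => if b > 127 then b - 256 else b)))

-- ===== PRECONDITION & SPEC =====
def Spec_convert_to_thrift_array_py (mac_address : List Int) (out : Int × Option (List Int)) : Prop := out = convert_to_thrift_array_py_alt mac_address
instance (mac_address : List Int) (out : Int × Option (List Int)) : Decidable (Spec_convert_to_thrift_array_py mac_address out) := by unfold Spec_convert_to_thrift_array_py; infer_instance

-- ===== CLAIM (what is proved, stated in full; the proofs are below) =====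
def Claim_equal_convert_to_thrift_array_py : Prop := ∀ (mac_address : List Int), Dom_convert_to_thrift_array_py mac_address → Spec_convert_to_thrift_array_py mac_address (convert_to_thrift_array_py mac_address)

-- ===== LEMMAS AND PROOFS =====

-- Loop invariant: A's fused loop equals "locate first bad from i, else append mapped tail".
lemma pvAloop_eq (xs : List Int) : ∀ (i : Int) (acc : List Int), 0 ≤ i →
    pvAloop xs i acc =
      (if pvBfirstBad xs i ≠ 0 then (pvBfirstBad xs i, none)
       else (0, some (acc ++ xs.map (fun b => if b > 127 then b - 256 else b)))) := by
  induction xs with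
  | nil => intro i acc _; simp [pvAloop, pvBfirstBad]
  | cons x rest ih =>
    intro i acc hi
    simp only [pvAloop, pvBfirstBad]
    by_cases hbad : x > 255 ∨ x < 0
    · simp only [if_pos hbad]
      have : i + 1 ≠ 0 := by omega
      simp [this]
    · simp only [if_neg hbad]
      by_cases h127 : x > 127
      · rw [if_pos h127, ih (i + 1) _ (by omega)]
        simp [h127]
      · rw [if_neg h127, ih (i + 1) _ (by omega)]
        simp [h127]

-- ===== VERDICT (by name: the statement is the Claim_ definition above) =====
theorem convert_to_thrift_array_py_spec : Claim_equal_convert_to_thrift_array_py := by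
  intro mac_address _
  unfold Spec_convert_to_thrift_array_py convert_to_thrift_array_py convert_to_thrift_array_py_alt
  rw [pvAloop_eq mac_address 0 [] le_rfl]
  simp
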